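-- pv_equiv track=rewrite | github.com/gilbertgeorge/kata | python/codewars/training/triangle_multiples.py | mult_triangle
-- ===== SOURCE A (Python) =====
-- def generate_row(n):
--     row = [x * n for x in range(1, n + 1)]
--     return row + row[-2::-1]
--
-- def mult_triangle(n):
--     total_sum = [0, 0, 0]
--     while n > 0:
--         row = generate_row(n)
--         for x in row:
--             if x % 2 == 0:
--                 total_sum[1] += x
--             else:
--                 total_sum[2] += x
--         # total_sum[0] += sum(row)
--         n -= 1
--     total_sum[0] = total_sum[1] + total_sum[2]
--     return total_sum
-- ===== SOURCE B (Python) =====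
-- def mult_triangle(n):
--     # O(1) closed forms: row k sums to k^3, so the grand total is (n(n+1)/2)^2;
--     # odd entries exist only in odd rows, and their sum over rows 1..n is m^4 with m = (n+1)//2.
--     if n <= 0:
--         return [0, 0, 0]
--     total = (n * (n + 1) // 2) ** 2
--     m = (n + 1) // 2
--     odd = m ** 4
--     return [total, total - odd, odd]
-- ===== Notes on version B (the rewrite author's own statement) =====
-- stated objective: faster
-- what changed: Replaced A's O(n^2) loop that builds each mirrored row and scans every entry by O(1) closed-form arithmetic: the grand total is (n(n+1)/2)^2 since row k sums to k^3, and the odd entries (which occur only in odd rows) sum to m^4 with m = (n+1)//2, so even = total - odd.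
import Mathlib
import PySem

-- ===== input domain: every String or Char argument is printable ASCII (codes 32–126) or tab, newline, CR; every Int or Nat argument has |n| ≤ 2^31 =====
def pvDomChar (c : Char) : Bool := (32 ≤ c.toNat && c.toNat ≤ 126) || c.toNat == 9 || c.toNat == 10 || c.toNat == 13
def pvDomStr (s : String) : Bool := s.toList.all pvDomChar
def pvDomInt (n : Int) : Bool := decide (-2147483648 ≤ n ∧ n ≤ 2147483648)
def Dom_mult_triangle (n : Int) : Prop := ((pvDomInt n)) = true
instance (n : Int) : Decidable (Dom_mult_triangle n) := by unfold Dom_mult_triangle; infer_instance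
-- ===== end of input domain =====

-- B replaces A's O(n^2) row-by-row scan with O(1) closed forms (row k sums to k^3; odd entries sum to m^4, m = (n+1)//2): objective 'faster'.


-- ===== PORT A =====
def generate_row (n : Int) : List Int :=
  let row := (PySem.List.pyRange 1 (n + 1) 1).map (fun x => x * n)
  row ++ ((PySem.List.slice? row (some (-2)) none (-1)).getD [])

def multTriangleLoop (n e o : Int) : Int × Int :=
  if h : 0 < n then
    let row := generate_row n
    let p := row.foldl
      (fun p x => if PySem.Int.mod x 2 = 0 then (p.1 + x, p.2) else (p.1, p.2 + x)) (e, o)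
    multTriangleLoop (n - 1) p.1 p.2
  else (e, o)
termination_by n.toNat
decreasing_by omega

def mult_triangle (n : Int) : List Int :=
  let p := multTriangleLoop n 0 0
  [p.1 + p.2, p.1, p.2]

-- ===== PORT B =====
def mult_triangle_alt (n : Int) : List Int :=
  if n ≤ 0 then [0, 0, 0]
  else
    let total := (PySem.Int.floordiv (n * (n + 1)) 2) ^ 2
    let m := PySem.Int.floordiv (n + 1) 2
    let odd := m ^ 4
    [total, total - odd, odd]

-- ===== PRECONDITION & SPEC =====
def Spec_mult_triangle (n : Int) (out : List Int) : Prop := out = mult_triangle_alt n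
instance (n : Int) (out : List Int) : Decidable (Spec_mult_triangle n out) := by unfold Spec_mult_triangle; infer_instance

-- ===== CLAIM (what is proved, stated in full; the proofs are below) =====
def Claim_equal_mult_triangle : Prop := ∀ (n : Int), Dom_mult_triangle n → Spec_mult_triangle n (mult_triangle n)

-- ===== LEMMAS AND PROOFS =====
theorem slice_neg2_rev (xs : List Int) :
    PySem.List.slice? xs (some (-2)) none (-1) = some (xs.dropLast.reverse) := by
  simp [PySem.List.slice?, PySem.List.sliceIndices]
  rcases Nat.lt_or_ge 1 xs.length with h | h
  · rw [if_pos h]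
    have hmax : max (-2 + (xs.length : Int)) (-1) = (xs.length : Int) - 2 := by omega
    rw [hmax]
    have hc : ((xs.length : Int) - 2 + 1).toNat = xs.length - 1 := by omega
    rw [hc]
    have hcong : ∀ k ∈ List.range (xs.length - 1),
        xs[((xs.length : Int) - 2 + -(k : Int)).toNat]? =
          (some ∘ fun k => xs[xs.length - 2 - k]'(by omega)) k := by
      intro k hk
      simp only [List.mem_range] at hk
      have : ((xs.length : Int) - 2 + -(k : Int)).toNat = xs.length - 2 - k := by omega
      rw [this, List.getElem?_eq_getElem (by omega)]
      rfl
    rw [List.filterMap_congr hcong, List.filterMap_eq_map]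
    apply List.ext_getElem
    · simp
    · intro i h1 h2
      simp only [List.getElem_map, List.getElem_range, List.getElem_reverse,
        List.getElem_dropLast, List.length_dropLast,
        show xs.length - 1 - 1 = xs.length - 2 from by omega]
  · rw [if_neg (by omega)]
    match xs, h with
    | [], _ => rfl
    | [a], _ => rfl

def esum : List Int → Int
  | [] => 0
  | x :: xs => (if PySem.Int.mod x 2 = 0 then x else 0) + esum xs

def osum : List Int → Int
  | [] => 0
  | x :: xs => (if PySem.Int.mod x 2 = 0 then 0 else x) + osum xs

theorem fold_parity (L : List Int) (e o : Int) :
    L.foldl (fun p x => if PySem.Int.mod x 2 = 0 then (p.1 + x, p.2) else (p.1, p.2 + x)) (e, o)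
      = (e + esum L, o + osum L) := by
  induction L generalizing e o with
  | nil => simp [esum, osum]
  | cons x xs ih =>
    simp only [List.foldl_cons, esum, osum]
    split_ifs with hx <;> rw [ih] <;> refine Prod.ext ?_ ?_ <;> simp <;> ring

theorem esum_append (a b : List Int) : esum (a ++ b) = esum a + esum b := by
  induction a with
  | nil => simp [esum]
  | cons x xs ih => simp [esum, ih]; ring

theorem osum_append (a b : List Int) : osum (a ++ b) = osum a + osum b := by
  induction a with
  | nil => simp [osum]
  | cons x xs ih => simp [osum, ih]; ring

theorem esum_reverse (a : List Int) : esum a.reverse = esum a := by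
  induction a with
  | nil => rfl
  | cons x xs ih => simp [esum, esum_append, ih]; ring

theorem osum_reverse (a : List Int) : osum a.reverse = osum a := by
  induction a with
  | nil => rfl
  | cons x xs ih => simp [osum, osum_append, ih]; ring

theorem mod_two_mul (a n : Int) :
    PySem.Int.mod (a * n) 2 = 0 ↔ (PySem.Int.mod a 2 = 0 ∨ PySem.Int.mod n 2 = 0) := by
  simp only [PySem.Int.mod_eq_zero_iff_dvd]
  exact Int.prime_two.dvd_mul

theorem mod_one_add (m : Nat) :
    PySem.Int.mod (1 + (m : Int)) 2 = (((1 + m) % 2 : Nat) : Int) := by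
  have h1 : (1 : Int) + m = ((1 + m : Nat) : Int) := by push_cast; ring
  rw [h1]
  exact_mod_cast PySem.Int.mod_natCast (1 + m) 2

theorem osum_base (n : Int) (m : Nat) :
    osum ((List.range m).map (fun j : Nat => (1 + (j : Int)) * n)) =
      if PySem.Int.mod n 2 = 0 then 0 else n * ((((m + 1) / 2 : Nat)) : Int) ^ 2 := by
  induction m with
  | zero => split_ifs <;> simp [osum]
  | succ m ih =>
    rw [List.range_succ, List.map_append, osum_append, ih]
    simp only [List.map_cons, List.map_nil, osum]
    by_cases hn : PySem.Int.mod n 2 = 0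
    · rw [if_pos hn, if_pos hn, if_pos ((mod_two_mul _ _).mpr (Or.inr hn))]
      ring
    · rw [if_neg hn, if_neg hn]
      by_cases hm : PySem.Int.mod (1 + (m : Int)) 2 = 0
      · rw [if_pos ((mod_two_mul _ _).mpr (Or.inl hm))]
        rw [mod_one_add] at hm
        obtain ⟨t, ht⟩ : ∃ t, m = 2 * t + 1 := ⟨m / 2, by omega⟩
        subst ht
        rw [show (2 * t + 1 + 1 + 1) / 2 = t + 1 from by omega,
            show (2 * t + 1 + 1) / 2 = t + 1 from by omega]
        ring
      · rw [if_neg (by rw [mod_two_mul]; exact not_or_intro hm hn)]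
        rw [mod_one_add] at hm
        obtain ⟨t, ht⟩ : ∃ t, m = 2 * t := ⟨m / 2, by omega⟩
        subst ht
        rw [show (2 * t + 1 + 1) / 2 = t + 1 from by omega,
            show (2 * t + 1) / 2 = t from by omega]
        push_cast
        ring

theorem esum_base (n : Int) (m : Nat) :
    esum ((List.range m).map (fun j : Nat => (1 + (j : Int)) * n)) =
      if PySem.Int.mod n 2 = 0 then n * ((m * (m + 1) / 2 : Nat) : Int)
      else n * (((m / 2) * (m / 2 + 1) : Nat) : Int) := by
  induction m with
  | zero => split_ifs <;> simp [esum]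
  | succ m ih =>
    rw [List.range_succ, List.map_append, esum_append, ih]
    simp only [List.map_cons, List.map_nil, esum]
    by_cases hn : PySem.Int.mod n 2 = 0
    · rw [if_pos hn, if_pos hn, if_pos ((mod_two_mul _ _).mpr (Or.inr hn))]
      obtain ⟨t, ht, h2⟩ : ∃ t, m * (m + 1) / 2 = t ∧ (m + 1) * (m + 1 + 1) / 2 = t + (m + 1) := by
        refine ⟨m * (m + 1) / 2, rfl, ?_⟩
        have h3 : 2 * (m * (m + 1) / 2) = m * (m + 1) :=
          Nat.two_mul_div_two_of_even (Nat.even_mul_succ_self m)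
        have h4 : (m + 1) * (m + 1 + 1) = m * (m + 1) + 2 * (m + 1) := by ring
        omega
      rw [ht, h2]
      push_cast
      ring
    · rw [if_neg hn, if_neg hn]
      by_cases hm : PySem.Int.mod (1 + (m : Int)) 2 = 0
      · rw [if_pos ((mod_two_mul _ _).mpr (Or.inl hm))]
        rw [mod_one_add] at hm
        obtain ⟨t, ht⟩ : ∃ t, m = 2 * t + 1 := ⟨m / 2, by omega⟩
        subst ht
        rw [show (2 * t + 1 + 1) / 2 = t + 1 from by omega,
            show (2 * t + 1) / 2 = t from by omega]
        push_cast
        ring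
      · rw [if_neg (by rw [mod_two_mul]; exact not_or_intro hm hn)]
        rw [mod_one_add] at hm
        obtain ⟨t, ht⟩ : ∃ t, m = 2 * t := ⟨m / 2, by omega⟩
        subst ht
        rw [show (2 * t + 1) / 2 = t from by omega, show 2 * t / 2 = t from by omega]
        ring

theorem row_eq (k : Nat) (hk : 1 ≤ k) :
    generate_row (k : Int) =
      (List.range k).map (fun j : Nat => (1 + (j : Int)) * (k : Int)) ++
      ((List.range (k - 1)).map (fun j : Nat => (1 + (j : Int)) * (k : Int))).reverse := by
  simp only [generate_row, PySem.List.pyRange_one, slice_neg2_rev, Option.getD_some]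
  have h1 : ((k : Int) + 1 - 1).toNat = k := by omega
  rw [h1, List.map_map]
  have hmap : ∀ L : List Nat,
      L.map ((fun x : Int => x * (k : Int)) ∘ (fun j : Nat => 1 + (j : Int))) =
        L.map (fun j : Nat => (1 + (j : Int)) * (k : Int)) :=
    fun L => List.map_congr_left (fun j _ => by simp)
  rw [hmap]
  congr 1
  have hr : List.range k = List.range (k - 1) ++ [k - 1] := by
    conv_lhs => rw [show k = (k - 1) + 1 from by omega]
    exact List.range_succ
  rw [hr]
  simp

theorem loop_closed (k : Nat) : ∀ e o : Int,
    multTriangleLoop (k : Int) e o =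
      (e + ((((k * (k + 1) / 2 : Nat) : Int)) ^ 2 - (((k + 1) / 2 : Nat) : Int) ^ 4),
       o + (((k + 1) / 2 : Nat) : Int) ^ 4) := by
  induction k with
  | zero => intro e o; rw [multTriangleLoop]; norm_num
  | succ k ih =>
    intro e o
    rw [multTriangleLoop]
    rw [dif_pos (by exact_mod_cast Nat.succ_pos k : (0 : Int) < ((k + 1 : Nat) : Int))]
    simp only [row_eq (k + 1) (by omega), fold_parity, esum_append, osum_append,
      esum_reverse, osum_reverse, esum_base, osum_base]
    rw [show ((k + 1 : Nat) : Int) - 1 = (k : Int) from by push_cast; ring, ih]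
    have hmod : PySem.Int.mod ((k + 1 : Nat) : Int) 2 = (((k + 1) % 2 : Nat) : Int) := by
      exact_mod_cast PySem.Int.mod_natCast (k + 1) 2
    by_cases h2 : (k + 1) % 2 = 0
    · obtain ⟨t, ht⟩ : ∃ t, k = 2 * t + 1 := ⟨k / 2, by omega⟩
      subst ht
      simp only [Nat.add_sub_cancel]
      have hc : (((2 * t + 1 + 1) % 2 : Nat) : Int) = 0 := by
        rw [show (2 * t + 1 + 1) % 2 = 0 from by omega]; norm_num
      rw [hmod, if_pos hc, if_pos hc, if_pos hc, if_pos hc]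
      rw [show (2 * t + 1 + 1) * (2 * t + 1 + 1 + 1) / 2 = (t + 1) * (2 * t + 3) from by
            rw [show (2 * t + 1 + 1) * (2 * t + 1 + 1 + 1) = 2 * ((t + 1) * (2 * t + 3)) from by ring]
            exact Nat.mul_div_cancel_left _ (by norm_num),
          show (2 * t + 1) * (2 * t + 1 + 1) / 2 = (2 * t + 1) * (t + 1) from by
            rw [show (2 * t + 1) * (2 * t + 1 + 1) = 2 * ((2 * t + 1) * (t + 1)) from by ring]
            exact Nat.mul_div_cancel_left _ (by norm_num),
          show (2 * t + 1 + 1) / 2 = t + 1 from by omega,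
          show (2 * t + 1 + 1 + 1) / 2 = t + 1 from by omega]
      simp only [Prod.mk.injEq]
      constructor <;> push_cast <;> ring
    · obtain ⟨t, ht⟩ : ∃ t, k = 2 * t := ⟨k / 2, by omega⟩
      subst ht
      simp only [Nat.add_sub_cancel]
      have hc : ¬((((2 * t + 1) % 2 : Nat) : Int) = 0) := by
        rw [show (2 * t + 1) % 2 = 1 from by omega]; norm_num
      rw [hmod, if_neg hc, if_neg hc, if_neg hc, if_neg hc]
      rw [show (2 * t) * (2 * t + 1) / 2 = t * (2 * t + 1) from by
            rw [show (2 * t) * (2 * t + 1) = 2 * (t * (2 * t + 1)) from by ring]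
            exact Nat.mul_div_cancel_left _ (by norm_num),
          show (2 * t + 1) * (2 * t + 1 + 1) / 2 = (2 * t + 1) * (t + 1) from by
            rw [show (2 * t + 1) * (2 * t + 1 + 1) = 2 * ((2 * t + 1) * (t + 1)) from by ring]
            exact Nat.mul_div_cancel_left _ (by norm_num),
          show (2 * t + 1) / 2 = t from by omega,
          show (2 * t + 1 + 1) / 2 = t + 1 from by omega,
          show 2 * t / 2 = t from by omega]
      simp only [Prod.mk.injEq]
      constructor <;> push_cast <;> ring

theorem final (n : Int) : mult_triangle n = mult_triangle_alt n := by
  by_cases hn : n ≤ 0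
  · simp only [mult_triangle, mult_triangle_alt, if_pos hn]
    rw [multTriangleLoop, dif_neg (by omega)]
    norm_num
  · obtain ⟨k, rfl⟩ : ∃ k : Nat, (k : Int) = n := ⟨n.toNat, by omega⟩
    simp only [mult_triangle, mult_triangle_alt, if_neg hn, loop_closed]
    have h1 : PySem.Int.floordiv ((k : Int) * ((k : Int) + 1)) 2
        = ((k * (k + 1) / 2 : Nat) : Int) := by
      rw [show (k : Int) * ((k : Int) + 1) = ((k * (k + 1) : Nat) : Int)
            from by push_cast; ring]
      exact_mod_cast PySem.Int.floordiv_natCast _ 2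
    have h2 : PySem.Int.floordiv ((k : Int) + 1) 2 = (((k + 1) / 2 : Nat) : Int) := by
      rw [show (k : Int) + 1 = ((k + 1 : Nat) : Int) from by push_cast; ring]
      exact_mod_cast PySem.Int.floordiv_natCast _ 2
    rw [h1, h2]
    simp only [List.cons.injEq, and_true]
    refine ⟨by ring, by ring, by ring⟩

-- ===== VERDICT (by name: the statement is the Claim_ definition above) =====
theorem mult_triangle_spec : Claim_equal_mult_triangle := by
  intro n _
  unfold Spec_mult_triangle
  exact final n
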